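-- pv_equiv track=rewrite | github.com/The-AnonymousCoder/VGAT-B | zzContrastExperiment/Tan24/Fig2.py | construction_fast
-- ===== SOURCE A (Python) =====
-- from typing import Dict, List, Tuple
--
-- def construction_fast(Xlist: List[List[float]], feature_num: int, Lst_WaterMark: List[int]):
--     """与 Fig1 相同的 O(W^2) 组合计数加速构造。"""
--     W = len(Lst_WaterMark)
--     counts_even = [0] * W
--     counts_odd = [0] * W
--     for coords in Xlist:
--         Ni = len(coords)
--         r = Ni % W
--         if (Ni % 2) == 0:
--             counts_even[r] += 1
--         else:
--             counts_odd[r] += 1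
--     categories: List[Tuple[int, int, int]] = []
--     for r in range(W):
--         if counts_even[r]:
--             categories.append((r, 0, counts_even[r]))
--         if counts_odd[r]:
--             categories.append((r, 1, counts_odd[r]))
--     acc = [0] * W
--     for i in range(len(categories)):
--         r1, p1, c1 = categories[i]
--         if c1 >= 2:
--             k = (r1 * r1) % W
--             acc[k] += (c1 * (c1 - 1) // 2)
--         for j in range(i + 1, len(categories)):
--             r2, p2, c2 = categories[j]
--             k = (r1 * r2) % W
--             acc[k] += (c1 * c2) if (p1 == p2) else -(c1 * c2)
--     return [255 if v > 0 else 0 for v in acc]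
-- ===== SOURCE B (Python) =====
-- from typing import List
--
--
-- def construction_fast(Xlist: List[List[float]], feature_num: int, Lst_WaterMark: List[int]):
--     """Signed-convolution construction: the signed category-pair sum equals a
--     product-of-sums convolution of per-residue signed counts."""
--     W = len(Lst_WaterMark)
--     counts_even = [0] * W
--     counts_odd = [0] * W
--     for coords in Xlist:
--         Ni = len(coords)
--         r = Ni % W
--         if (Ni % 2) == 0:
--             counts_even[r] += 1
--         else:
--             counts_odd[r] += 1
--     s = [counts_even[r] - counts_odd[r] for r in range(W)]
--     t = [counts_even[r] + counts_odd[r] for r in range(W)]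
--     conv = [0] * W
--     nz = [r for r in range(W) if s[r] != 0]
--     for a in nz:
--         for b in nz:
--             conv[(a * b) % W] += s[a] * s[b]
--     diag = [0] * W
--     for r in range(W):
--         diag[(r * r) % W] += t[r]
--     acc = [(conv[k] - diag[k]) // 2 for k in range(W)]
--     return [255 if v > 0 else 0 for v in acc]
-- ===== Notes on version B (the rewrite author's own statement) =====
-- stated objective: alternative
-- what changed: Replaces the explicit category-list construction and signed pairwise enumeration over category pairs by a signed product-of-sums convolution: per-residue signed counts s_r=even_r-odd_r are convolved over all residue pairs ((a*b)%W), a diagonal of totals t_r is subtracted and the result halved, using the identity that the parity sign of a pair factors as a product of per-category signs.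
import Mathlib
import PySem

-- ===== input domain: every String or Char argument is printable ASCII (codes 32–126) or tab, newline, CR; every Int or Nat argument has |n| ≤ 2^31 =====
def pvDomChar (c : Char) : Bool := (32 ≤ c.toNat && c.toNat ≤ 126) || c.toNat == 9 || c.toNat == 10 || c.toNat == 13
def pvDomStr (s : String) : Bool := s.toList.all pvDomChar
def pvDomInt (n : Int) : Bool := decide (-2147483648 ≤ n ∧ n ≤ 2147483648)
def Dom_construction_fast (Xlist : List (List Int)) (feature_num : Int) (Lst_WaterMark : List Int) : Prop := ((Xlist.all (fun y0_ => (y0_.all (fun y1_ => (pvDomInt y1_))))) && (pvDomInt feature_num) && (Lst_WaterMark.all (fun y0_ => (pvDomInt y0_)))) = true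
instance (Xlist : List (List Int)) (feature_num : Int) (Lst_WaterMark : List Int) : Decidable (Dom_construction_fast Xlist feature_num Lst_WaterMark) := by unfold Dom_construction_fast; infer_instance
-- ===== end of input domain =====

-- B replaces A's signed enumeration over category pairs by a signed product-of-sums
-- convolution of per-residue counts (alternative algorithm, similar cost).

-- acc[k] += v  (index always in range on admitted inputs)
def pvAddAt (acc : List Int) (k : Nat) (v : Int) : List Int := acc.set k (acc.getD k 0 + v)

-- counts_even[r] += 1 (a no-op out of range never happens inside Pre_)
def pvBump (l : List Int) (r : Nat) : List Int := l.set r (l.getD r 0 + 1)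

-- the counting loop, textually identical in A and in B, shared by both ports
def pvCounts (Xlist : List (List Int)) (W : Nat) : List Int × List Int :=
  Xlist.foldl (fun p coords =>
    let Ni := coords.length
    let r := Ni % W
    if Ni % 2 == 0 then (pvBump p.1 r, p.2) else (p.1, pvBump p.2 r))
    (List.replicate W 0, List.replicate W 0)

-- ===== PORT A =====
def construction_fast (Xlist : List (List Int)) (feature_num : Int) (Lst_WaterMark : List Int) : List Int :=
  let W := Lst_WaterMark.length
  let cnt := pvCounts Xlist W
  let counts_even := cnt.1
  let counts_odd := cnt.2
  let categories := (List.range W).foldl (fun cats r =>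
      let cats := if counts_even.getD r 0 ≠ 0 then cats ++ [(r, (0 : Nat), counts_even.getD r 0)] else cats
      if counts_odd.getD r 0 ≠ 0 then cats ++ [(r, (1 : Nat), counts_odd.getD r 0)] else cats)
    ([] : List (Nat × Nat × Int))
  let acc := (List.range categories.length).foldl (fun acc i =>
      let c := categories.getD i (0, 0, 0)
      let acc := if c.2.2 ≥ 2 then
          pvAddAt acc ((c.1 * c.1) % W) (PySem.Int.floordiv (c.2.2 * (c.2.2 - 1)) 2) else acc
      (List.range' (i + 1) (categories.length - (i + 1))).foldl (fun acc j =>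
          let d := categories.getD j (0, 0, 0)
          pvAddAt acc ((c.1 * d.1) % W) (if c.2.1 == d.2.1 then c.2.2 * d.2.2 else -(c.2.2 * d.2.2))) acc)
    (List.replicate W 0)
  acc.map (fun v => if v > 0 then (255 : Int) else 0)

-- ===== PORT B =====
def construction_fast_alt (Xlist : List (List Int)) (feature_num : Int) (Lst_WaterMark : List Int) : List Int :=
  let W := Lst_WaterMark.length
  let cnt := pvCounts Xlist W
  let s := (List.range W).map (fun r => cnt.1.getD r 0 - cnt.2.getD r 0)
  let t := (List.range W).map (fun r => cnt.1.getD r 0 + cnt.2.getD r 0)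
  let nz := (List.range W).filter (fun r => s.getD r 0 != 0)
  let conv := nz.foldl (fun conv a =>
      nz.foldl (fun conv b =>
        pvAddAt conv ((a * b) % W) (s.getD a 0 * s.getD b 0)) conv)
    (List.replicate W 0)
  let diag := (List.range W).foldl (fun d r => pvAddAt d ((r * r) % W) (t.getD r 0))
    (List.replicate W 0)
  let acc := (List.range W).map (fun k => PySem.Int.floordiv (conv.getD k 0 - diag.getD k 0) 2)
  acc.map (fun v => if v > 0 then (255 : Int) else 0)

-- ===== PRECONDITION & SPEC =====
-- Pre_ excludes only W = 0 with a non-empty Xlist, where `Ni % W` raises ZeroDivisionError in A (and in B).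
def Pre_construction_fast (Xlist : List (List Int)) (feature_num : Int) (Lst_WaterMark : List Int) : Prop :=
  Lst_WaterMark = [] → Xlist = []
instance (Xlist : List (List Int)) (feature_num : Int) (Lst_WaterMark : List Int) : Decidable (Pre_construction_fast Xlist feature_num Lst_WaterMark) := by unfold Pre_construction_fast; infer_instance
def pvWitness_construction_fast : List (List Int) × Int × List Int := ([[1], [2, 3], []], 0, [5, 6])

def Spec_construction_fast (Xlist : List (List Int)) (feature_num : Int) (Lst_WaterMark : List Int) (out : List Int) : Prop := out = construction_fast_alt Xlist feature_num Lst_WaterMark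
instance (Xlist : List (List Int)) (feature_num : Int) (Lst_WaterMark : List Int) (out : List Int) : Decidable (Spec_construction_fast Xlist feature_num Lst_WaterMark out) := by unfold Spec_construction_fast; infer_instance

-- ===== CLAIM (what is proved, stated in full; the proofs are below) =====
def Claim_equal_construction_fast : Prop := ∀ (Xlist : List (List Int)) (feature_num : Int) (Lst_WaterMark : List Int), Dom_construction_fast Xlist feature_num Lst_WaterMark → Pre_construction_fast Xlist feature_num Lst_WaterMark → Spec_construction_fast Xlist feature_num Lst_WaterMark (construction_fast Xlist feature_num Lst_WaterMark)

-- ===== LEMMAS AND PROOFS =====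


-- generic finite-sum notation over lists
def sumI {α : Type} (l : List α) (f : α → Int) : Int := (l.map f).sum

def updStep (a : List Int) (p : Nat × Int) : List Int := pvAddAt a p.1 p.2

-- proof-only abbreviations
def catsFull (W : Nat) (ce co : List Int) : List (Nat × Nat × Int) :=
  (List.range W).flatMap (fun r => [(r, (0 : Nat), ce.getD r 0), (r, (1 : Nat), co.getD r 0)])

def pvFk (W k : Nat) (c d : Nat × Nat × Int) : Int :=
  if (c.1 * d.1) % W = k then (if c.2.1 == d.2.1 then c.2.2 * d.2.2 else -(c.2.2 * d.2.2)) else 0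

def pvG (W k : Nat) (c : Nat × Nat × Int) : Int :=
  if c.2.2 ≥ 2 then (if (c.1 * c.1) % W = k then PySem.Int.floordiv (c.2.2 * (c.2.2 - 1)) 2 else 0) else 0

def pairSum {α : Type} (f : α → α → Int) : List α → Int
  | [] => 0
  | x :: xs => sumI xs (f x) + pairSum f xs

-- sumI toolbox
theorem sumI_nil {α : Type} (f : α → Int) : sumI ([] : List α) f = 0 := rfl
theorem sumI_cons {α : Type} (x : α) (l : List α) (f : α → Int) :
    sumI (x :: l) f = f x + sumI l f := by simp [sumI]
theorem sumI_append {α : Type} (l m : List α) (f : α → Int) :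
    sumI (l ++ m) f = sumI l f + sumI m f := by simp [sumI]
theorem sumI_map {α β : Type} (l : List α) (h : α → β) (f : β → Int) :
    sumI (l.map h) f = sumI l (fun x => f (h x)) := by
  unfold sumI; rw [List.map_map]; rfl
theorem sumI_flatMap {α β : Type} (l : List α) (g : α → List β) (f : β → Int) :
    sumI (l.flatMap g) f = sumI l (fun x => sumI (g x) f) := by
  induction l with
  | nil => rfl
  | cons x t ih => simp [List.flatMap_cons, sumI_append, sumI_cons, ih]
theorem sumI_congr {α : Type} {l : List α} {f g : α → Int} (h : ∀ x ∈ l, f x = g x) :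
    sumI l f = sumI l g := by
  unfold sumI; rw [List.map_congr_left h]
theorem sumI_add {α : Type} (l : List α) (f g : α → Int) :
    sumI l (fun x => f x + g x) = sumI l f + sumI l g := by
  induction l with
  | nil => rfl
  | cons x t ih => simp [sumI_cons, ih]; ring
theorem sumI_sub {α : Type} (l : List α) (f g : α → Int) :
    sumI l (fun x => f x - g x) = sumI l f - sumI l g := by
  induction l with
  | nil => rfl
  | cons x t ih => simp [sumI_cons, ih]; ring
theorem sumI_two_mul {α : Type} (l : List α) (f : α → Int) :
    sumI l (fun x => 2 * f x) = 2 * sumI l f := by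
  induction l with
  | nil => rfl
  | cons x t ih => simp only [sumI_cons, ih]; ring
theorem sumI_zero {α : Type} (l : List α) : sumI l (fun _ => (0 : Int)) = 0 := by
  induction l <;> simp [sumI_nil, sumI_cons, *]

-- update-fold characterisation
theorem length_pvAddAt (acc : List Int) (k : Nat) (v : Int) :
    (pvAddAt acc k v).length = acc.length := by simp [pvAddAt]
theorem getD_pvAddAt (acc : List Int) (j k : Nat) (v : Int) (hk : k < acc.length) :
    (pvAddAt acc j v).getD k 0 = acc.getD k 0 + (if j = k then v else 0) := by
  unfold pvAddAt
  simp only [List.getD_eq_getElem?_getD, List.getElem?_set]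
  by_cases h : j = k
  · subst h; simp [hk]
  · simp [h]
theorem length_foldl_updStep (l : List (Nat × Int)) (acc : List Int) :
    (l.foldl updStep acc).length = acc.length := by
  induction l generalizing acc with
  | nil => rfl
  | cons p t ih => simpa [updStep, length_pvAddAt] using ih (updStep acc p)
theorem getD_foldl_updStep (l : List (Nat × Int)) (acc : List Int) (k : Nat)
    (hk : k < acc.length) :
    (l.foldl updStep acc).getD k 0 = acc.getD k 0 + sumI l (fun p => if p.1 = k then p.2 else 0) := by
  induction l generalizing acc with
  | nil => simp [sumI_nil]
  | cons p t ih =>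
    rw [List.foldl_cons, ih _ (by simpa [updStep, length_pvAddAt] using hk)]
    rw [show updStep acc p = pvAddAt acc p.1 p.2 from rfl, getD_pvAddAt _ _ _ _ hk, sumI_cons]
    ring

-- index bridges
theorem map_getD_range {α : Type} (l : List α) (d : α) :
    (List.range l.length).map (fun i => l.getD i d) = l := by
  apply List.ext_getElem
  · simp
  · intro i h1 h2
    simp [List.getD_eq_getElem?_getD, List.getElem?_eq_getElem h2]
theorem sumI_range_getD {α : Type} (l : List α) (d : α) (g : α → Int) :
    sumI (List.range l.length) (fun i => g (l.getD i d)) = sumI l g := by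
  have : sumI (List.range l.length) (fun i => g (l.getD i d))
      = sumI ((List.range l.length).map (fun i => l.getD i d)) g := by
    rw [sumI_map]
  rw [this, map_getD_range]
theorem getD_map_range (W : Nat) (f : Nat → Int) (a : Nat) (ha : a < W) :
    ((List.range W).map f).getD a 0 = f a := by
  simp [List.getD_eq_getElem?_getD, ha]
theorem sumI_range' (s m : Nat) (g : Nat → Int) :
    sumI (List.range' s m) g = sumI (List.range m) (fun j => g (s + j)) := by
  rw [List.range'_eq_map_range, sumI_map]

theorem idxPair_eq_pairSum {α : Type} (f : α → α → Int) (d : α) (l : List α) :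
    sumI (List.range l.length) (fun i =>
      sumI (List.range (l.length - (i + 1))) (fun j => f (l.getD i d) (l.getD (i + 1 + j) d)))
    = pairSum f l := by
  induction l with
  | nil => rfl
  | cons x xs ih =>
    rw [List.length_cons, List.range_succ_eq_map, sumI_cons, sumI_map]
    have h0 : sumI (List.range (xs.length + 1 - (0 + 1)))
        (fun j => f ((x :: xs).getD 0 d) ((x :: xs).getD (0 + 1 + j) d)) = sumI xs (f x) := by
      have hsh : ∀ j, (x :: xs).getD (0 + 1 + j) d = xs.getD j d := by
        intro j; simp [Nat.add_comm, List.getD_cons_succ]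
      rw [sumI_congr (fun j _ => by rw [hsh j])]
      simpa using sumI_range_getD xs d (f x)
    have h1 : sumI (List.range xs.length) (fun i =>
        sumI (List.range (xs.length + 1 - (i.succ + 1)))
          (fun j => f ((x :: xs).getD i.succ d) ((x :: xs).getD (i.succ + 1 + j) d)))
      = pairSum f xs := by
      rw [← ih]
      apply sumI_congr
      intro i _
      have hlen : xs.length + 1 - (i.succ + 1) = xs.length - (i + 1) := by omega
      rw [hlen]
      apply sumI_congr
      intro j _
      have e1 : (x :: xs).getD i.succ d = xs.getD i d := List.getD_cons_succ
      have e2 : (x :: xs).getD (i.succ + 1 + j) d = xs.getD (i + 1 + j) d := by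
        have e3 : i.succ + 1 + j = (i + 1 + j) + 1 := by omega
        rw [e3, List.getD_cons_succ]
      rw [e1, e2]
    rw [h0, h1, pairSum]

-- pair/ordered sums
theorem ordSum_eq {α : Type} (f : α → α → Int) (hs : ∀ x y, f x y = f y x) (l : List α) :
    sumI l (fun x => sumI l (fun y => f x y)) = 2 * pairSum f l + sumI l (fun x => f x x) := by
  induction l with
  | nil => simp [sumI_nil, pairSum]
  | cons x t ih =>
    have ih' : sumI t (fun a => sumI t (f a)) = 2 * pairSum f t + sumI t (fun x => f x x) := ih
    simp only [sumI_cons, pairSum]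
    rw [sumI_add (f := fun y => f y x) (g := fun a => sumI t (f a)), ih',
      sumI_congr (l := t) (f := fun y => f y x) (g := fun y => f x y) (by intro y _; exact hs y x)]
    ring

-- filtering away zero-count categories
theorem sumI_filter_eq {α : Type} (l : List α) (p : α → Bool) (g : α → Int)
    (h : ∀ x ∈ l, p x = false → g x = 0) : sumI (l.filter p) g = sumI l g := by
  induction l with
  | nil => rfl
  | cons x t ih =>
    have ih' := ih (fun y hy => h y (List.mem_cons_of_mem _ hy))
    by_cases hx : p x
    · rw [List.filter_cons, if_pos (by simp [hx]), sumI_cons, sumI_cons, ih']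
    · simp only [Bool.not_eq_true] at hx
      rw [List.filter_cons, if_neg (by simp [hx]), sumI_cons, ih',
        h x (List.mem_cons_self) hx]
      ring
theorem pairSum_filter_eq {α : Type} (l : List α) (p : α → Bool) (f : α → α → Int)
    (h : ∀ x ∈ l, p x = false → ∀ y, f x y = 0 ∧ f y x = 0) :
    pairSum f (l.filter p) = pairSum f l := by
  induction l with
  | nil => rfl
  | cons x t ih =>
    have ht : ∀ y ∈ t, p y = false → ∀ z, f y z = 0 ∧ f z y = 0 :=
      fun y hy => h y (List.mem_cons_of_mem _ hy)
    by_cases hx : p x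
    · simp only [List.filter_cons, hx, if_pos, pairSum]
      rw [ih ht, sumI_filter_eq t p (f x) (fun y hy hpy => (ht y hy hpy x).2)]
      
    · simp only [Bool.not_eq_true] at hx
      rw [List.filter_cons, if_neg (by simp [hx]), pairSum, ih ht]
      have : sumI t (f x) = 0 := by
        rw [sumI_congr (g := fun _ => 0) (fun y _ => (h x (List.mem_cons_self) hx y).1), sumI_zero]
      simp [this]

-- counts are nonnegative entrywise
theorem getD_pvBump_nonneg (l : List Int) (r i : Nat) (h : ∀ j, 0 ≤ l.getD j 0) :
    0 ≤ (pvBump l r).getD i 0 := by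
  unfold pvBump
  simp only [List.getD_eq_getElem?_getD, List.getElem?_set]
  by_cases hri : r = i
  · subst hri
    by_cases hr : r < l.length
    · have hh := h r
      simp only [List.getD_eq_getElem?_getD, List.getElem?_eq_getElem hr] at hh
      simp only [hr, and_true, if_true, if_pos rfl]
      simp only [List.getElem?_eq_getElem hr, Option.getD_some] at hh ⊢
      linarith
    · simp only [hr, if_false]
      simpa using h i
  · simpa [hri] using h i
theorem pvCounts_nonneg (Xlist : List (List Int)) (W : Nat) :
    (∀ i, 0 ≤ (pvCounts Xlist W).1.getD i 0) ∧ (∀ i, 0 ≤ (pvCounts Xlist W).2.getD i 0) := by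
  unfold pvCounts
  suffices h : ∀ (acc : List Int × List Int), (∀ i, 0 ≤ acc.1.getD i 0) → (∀ i, 0 ≤ acc.2.getD i 0) →
      (∀ i, 0 ≤ (Xlist.foldl (fun p coords =>
        let Ni := coords.length
        let r := Ni % W
        if Ni % 2 == 0 then (pvBump p.1 r, p.2) else (p.1, pvBump p.2 r)) acc).1.getD i 0) ∧
      (∀ i, 0 ≤ (Xlist.foldl (fun p coords =>
        let Ni := coords.length
        let r := Ni % W
        if Ni % 2 == 0 then (pvBump p.1 r, p.2) else (p.1, pvBump p.2 r)) acc).2.getD i 0) by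
    apply h <;> intro i <;> by_cases hi : i < W <;>
      simp [List.getD_eq_getElem?_getD, List.getElem?_replicate, hi]
  induction Xlist with
  | nil => intro acc h1 h2; exact ⟨h1, h2⟩
  | cons c t ih =>
    intro acc h1 h2
    rw [List.foldl_cons]
    by_cases hc : c.length % 2 == 0 <;> simp only [hc, if_pos, if_neg, Bool.not_eq_true] <;>
      first
      | exact ih _ (fun i => getD_pvBump_nonneg _ _ _ h1) h2
      | exact ih _ h1 (fun i => getD_pvBump_nonneg _ _ _ h2)

-- A-side: the nested index loop as a flat list of (key, increment) updates
def updsOfA (W : Nat) (cats : List (Nat × Nat × Int)) (i : Nat) : List (Nat × Int) :=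
  let c := cats.getD i (0, 0, 0)
  (if c.2.2 ≥ 2 then [((c.1 * c.1) % W, PySem.Int.floordiv (c.2.2 * (c.2.2 - 1)) 2)] else [])
    ++ (List.range' (i + 1) (cats.length - (i + 1))).map (fun j =>
        let d := cats.getD j (0, 0, 0)
        ((c.1 * d.1) % W, if c.2.1 == d.2.1 then c.2.2 * d.2.2 else -(c.2.2 * d.2.2)))

theorem accA_flatten (W : Nat) (cats : List (Nat × Nat × Int)) (init : List Int) :
    (List.range cats.length).foldl (fun acc i =>
      let c := cats.getD i (0, 0, 0)
      let acc := if c.2.2 ≥ 2 then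
          pvAddAt acc ((c.1 * c.1) % W) (PySem.Int.floordiv (c.2.2 * (c.2.2 - 1)) 2) else acc
      (List.range' (i + 1) (cats.length - (i + 1))).foldl (fun acc j =>
          let d := cats.getD j (0, 0, 0)
          pvAddAt acc ((c.1 * d.1) % W) (if c.2.1 == d.2.1 then c.2.2 * d.2.2 else -(c.2.2 * d.2.2))) acc)
      init
    = ((List.range cats.length).flatMap (updsOfA W cats)).foldl updStep init := by
  rw [List.foldl_flatMap]
  have hbody : ∀ (acc : List Int) (i : Nat),
      (let c := cats.getD i (0, 0, 0)
       let acc := if c.2.2 ≥ 2 then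
          pvAddAt acc ((c.1 * c.1) % W) (PySem.Int.floordiv (c.2.2 * (c.2.2 - 1)) 2) else acc
       (List.range' (i + 1) (cats.length - (i + 1))).foldl (fun acc j =>
          let d := cats.getD j (0, 0, 0)
          pvAddAt acc ((c.1 * d.1) % W)
            (if c.2.1 == d.2.1 then c.2.2 * d.2.2 else -(c.2.2 * d.2.2))) acc)
      = (updsOfA W cats i).foldl updStep acc := by
    intro acc i
    unfold updsOfA
    rw [List.foldl_append, List.foldl_map]
    by_cases hc : (cats.getD i (0, 0, 0)).2.2 ≥ 2
    · simp only [if_pos hc]; rfl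
    · simp only [if_neg hc]; rfl
  simp only [hbody]

theorem sumI_updsOfA (W k : Nat) (cats : List (Nat × Nat × Int)) (i : Nat) :
    sumI (updsOfA W cats i) (fun p => if p.1 = k then p.2 else 0)
    = pvG W k (cats.getD i (0, 0, 0))
      + sumI (List.range' (i + 1) (cats.length - (i + 1)))
          (fun j => pvFk W k (cats.getD i (0, 0, 0)) (cats.getD j (0, 0, 0))) := by
  unfold updsOfA
  rw [sumI_append, sumI_map]
  congr 1
  · unfold pvG
    by_cases hc : (cats.getD i (0, 0, 0)).2.2 ≥ 2
    · rw [if_pos hc, if_pos hc, sumI_cons, sumI_nil, add_zero]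
    · rw [if_neg hc, if_neg hc, sumI_nil]

theorem accA_entry (W k : Nat) (cats : List (Nat × Nat × Int)) (hk : k < W) :
    ((List.range cats.length).foldl (fun acc i =>
      let c := cats.getD i (0, 0, 0)
      let acc := if c.2.2 ≥ 2 then
          pvAddAt acc ((c.1 * c.1) % W) (PySem.Int.floordiv (c.2.2 * (c.2.2 - 1)) 2) else acc
      (List.range' (i + 1) (cats.length - (i + 1))).foldl (fun acc j =>
          let d := cats.getD j (0, 0, 0)
          pvAddAt acc ((c.1 * d.1) % W) (if c.2.1 == d.2.1 then c.2.2 * d.2.2 else -(c.2.2 * d.2.2))) acc)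
      (List.replicate W 0)).getD k 0
    = sumI cats (pvG W k) + pairSum (pvFk W k) cats := by
  rw [accA_flatten, getD_foldl_updStep _ _ _ (by simpa using hk)]
  have hrep : (List.replicate W (0 : Int)).getD k 0 = 0 := by
    simp [List.getD_eq_getElem?_getD, List.getElem?_replicate, hk]
  rw [hrep, sumI_flatMap]
  rw [sumI_congr (fun i _ => sumI_updsOfA W k cats i), sumI_add, zero_add]
  congr 1
  · exact sumI_range_getD cats (0, 0, 0) (pvG W k)
  · rw [sumI_congr (fun i _ => sumI_range' (i + 1) (cats.length - (i + 1)) _)]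
    exact idxPair_eq_pairSum (pvFk W k) (0, 0, 0) cats


-- the category list is the nonzero-filtered full list
theorem cats_eq_filter (W : Nat) (ce co : List Int) :
    (List.range W).foldl (fun cats r =>
      let cats := if ce.getD r 0 ≠ 0 then cats ++ [(r, (0 : Nat), ce.getD r 0)] else cats
      if co.getD r 0 ≠ 0 then cats ++ [(r, (1 : Nat), co.getD r 0)] else cats)
      ([] : List (Nat × Nat × Int))
    = (catsFull W ce co).filter (fun c => c.2.2 != 0) := by
  have hbody : ∀ (cats : List (Nat × Nat × Int)) (r : Nat),
      (let cats' := if ce.getD r 0 ≠ 0 then cats ++ [(r, (0 : Nat), ce.getD r 0)] else cats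
       if co.getD r 0 ≠ 0 then cats' ++ [(r, (1 : Nat), co.getD r 0)] else cats')
      = cats ++ ((if ce.getD r 0 ≠ 0 then [(r, (0 : Nat), ce.getD r 0)] else [])
          ++ (if co.getD r 0 ≠ 0 then [(r, (1 : Nat), co.getD r 0)] else [])) := by
    intro cats r
    by_cases h1 : ce.getD r 0 ≠ 0
    · by_cases h2 : co.getD r 0 ≠ 0
      · simp only [if_pos h1, if_pos h2, List.append_assoc]
      · simp only [if_pos h1, if_neg h2, List.append_nil]
    · by_cases h2 : co.getD r 0 ≠ 0
      · simp only [if_neg h1, if_pos h2, List.nil_append]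
      · simp only [if_neg h1, if_neg h2, List.append_nil]
  simp only [hbody]
  rw [PySem.List.foldl_append_eq_flatMap, List.nil_append]
  unfold catsFull
  rw [List.filter_flatMap]
  congr 1
  funext r
  by_cases h1 : ce.getD r 0 ≠ 0 <;> by_cases h2 : co.getD r 0 ≠ 0 <;>
    simp_all [List.filter_cons, bne_iff_ne]

-- B-side: entry of a double accumulation fold
theorem foldl2_entry (W k : Nat) (hk : k < W) (l : List Nat) (key : Nat → Nat → Nat) (v : Nat → Nat → Int) :
    ((l.foldl (fun conv a =>
        l.foldl (fun conv b => pvAddAt conv (key a b) (v a b)) conv)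
      (List.replicate W 0)).getD k 0)
    = sumI l (fun a => sumI l (fun b =>
        if key a b = k then v a b else 0)) := by
  have hbody : ∀ (conv : List Int) (a : Nat),
      l.foldl (fun conv b => pvAddAt conv (key a b) (v a b)) conv
      = (l.map (fun b => (key a b, v a b))).foldl updStep conv := by
    intro conv a; rw [List.foldl_map]; rfl
  simp only [hbody]
  rw [← List.foldl_flatMap, getD_foldl_updStep _ _ _ (by simpa using hk)]
  have hrep : (List.replicate W (0 : Int)).getD k 0 = 0 := by
    simp [List.getD_eq_getElem?_getD, hk]
  rw [hrep, zero_add, sumI_flatMap]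
  exact sumI_congr (fun a _ => by rw [sumI_map])

theorem foldl1_entry (W k : Nat) (hk : k < W) (key : Nat → Nat) (v : Nat → Int) :
    (((List.range W).foldl (fun d r => pvAddAt d (key r) (v r)) (List.replicate W 0)).getD k 0)
    = sumI (List.range W) (fun r => if key r = k then v r else 0) := by
  have hbody : (List.range W).foldl (fun d r => pvAddAt d (key r) (v r)) (List.replicate W 0)
      = ((List.range W).map (fun r => (key r, v r))).foldl updStep (List.replicate W 0) := by
    rw [List.foldl_map]; rfl
  rw [hbody, getD_foldl_updStep _ _ _ (by simpa using hk)]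
  have hrep : (List.replicate W (0 : Int)).getD k 0 = 0 := by
    simp [List.getD_eq_getElem?_getD, hk]
  rw [hrep, zero_add, sumI_map]

-- symmetry of the pair weight
theorem pvFk_symm (W k : Nat) (x y : Nat × Nat × Int) : pvFk W k x y = pvFk W k y x := by
  unfold pvFk
  rw [Nat.mul_comm y.1 x.1]
  by_cases hp : x.2.1 = y.2.1
  · simp [hp, Int.mul_comm]
  · have hp' : ¬ (y.2.1 = x.2.1) := fun h => hp h.symm
    simp [hp, hp', Int.mul_comm]

theorem sumI_catsFull (W : Nat) (ce co : List Int) (h : (Nat × Nat × Int) → Int) :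
    sumI (catsFull W ce co) h
    = sumI (List.range W) (fun r => h (r, 0, ce.getD r 0) + h (r, 1, co.getD r 0)) := by
  unfold catsFull
  rw [sumI_flatMap]
  exact sumI_congr (fun r _ => by rw [sumI_cons, sumI_cons, sumI_nil]; ring)

theorem catsFull_nonneg (W : Nat) (ce co : List Int)
    (hce : ∀ i, 0 ≤ ce.getD i 0) (hco : ∀ i, 0 ≤ co.getD i 0) :
    ∀ c ∈ catsFull W ce co, 0 ≤ c.2.2 := by
  intro c hc
  unfold catsFull at hc
  rw [List.mem_flatMap] at hc
  obtain ⟨r, -, hc⟩ := hc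
  simp only [List.mem_cons, List.mem_singleton, List.not_mem_nil, or_false] at hc
  rcases hc with rfl | rfl
  · exact hce r
  · exact hco r

theorem two_mul_floordiv_pred (c : Int) :
    2 * PySem.Int.floordiv (c * (c - 1)) 2 = c * (c - 1) := by
  have hd : (2 : Int) ∣ c * (c - 1) := by
    rcases Int.even_or_odd c with he | ho
    · exact Dvd.dvd.mul_right he.two_dvd _
    · have : Even (c - 1) := by rcases ho with ⟨m, hm⟩; exact ⟨m, by omega⟩
      exact Dvd.dvd.mul_left this.two_dvd _
  have h1 := PySem.Int.floordiv_mul_add_mod (c * (c - 1)) 2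
  have h2 : PySem.Int.mod (c * (c - 1)) 2 = 0 := (PySem.Int.mod_eq_zero_iff_dvd _ _).mpr hd
  omega

theorem floordiv_two_mul_cancel (z : Int) : PySem.Int.floordiv (2 * z) 2 = z := by
  rw [PySem.Int.floordiv_eq_ediv_of_pos (by norm_num)]
  exact Int.mul_ediv_cancel_left z (by norm_num)

-- the central identity: A's acc entry equals B's halved convolution entry
theorem central (W k : Nat) (ce co : List Int) (hk : k < W)
    (hce : ∀ i, 0 ≤ ce.getD i 0) (hco : ∀ i, 0 ≤ co.getD i 0) :
    sumI ((catsFull W ce co).filter (fun c => c.2.2 != 0)) (pvG W k)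
      + pairSum (pvFk W k) ((catsFull W ce co).filter (fun c => c.2.2 != 0))
    = PySem.Int.floordiv
        ((sumI (List.range W) (fun a => sumI (List.range W) (fun b =>
            if (a * b) % W = k then (ce.getD a 0 - co.getD a 0) * (ce.getD b 0 - co.getD b 0) else 0)))
          - (sumI (List.range W) (fun r =>
              if (r * r) % W = k then ce.getD r 0 + co.getD r 0 else 0))) 2 := by
  have hG0 : ∀ c ∈ catsFull W ce co, (c.2.2 != 0) = false → pvG W k c = 0 := by
    intro c _ h
    have hc : c.2.2 = 0 := by simpa using h
    simp [pvG, hc]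
  have hF0 : ∀ c ∈ catsFull W ce co, (c.2.2 != 0) = false →
      ∀ y, pvFk W k c y = 0 ∧ pvFk W k y c = 0 := by
    intro c _ h y
    have hc : c.2.2 = 0 := by simpa using h
    constructor <;> · unfold pvFk; split_ifs <;> simp [hc]
  rw [sumI_filter_eq _ _ _ hG0, pairSum_filter_eq _ _ _ hF0]
  have hnn := catsFull_nonneg W ce co hce hco
  have hGc : ∀ c ∈ catsFull W ce co,
      2 * pvG W k c = pvFk W k c c - (if (c.1 * c.1) % W = k then c.2.2 else 0) := by
    intro c hcF
    have hc0 : 0 ≤ c.2.2 := hnn c hcF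
    unfold pvG pvFk
    simp only [beq_self_eq_true, if_true]
    by_cases hkey : (c.1 * c.1) % W = k
    · simp only [if_pos hkey]
      by_cases hc2 : c.2.2 ≥ 2
      · rw [if_pos hc2, two_mul_floordiv_pred]; ring
      · rw [if_neg hc2]
        have hc01 : c.2.2 = 0 ∨ c.2.2 = 1 := by omega
        rcases hc01 with h | h <;> rw [h] <;> ring
    · simp only [if_neg hkey]
      split_ifs <;> ring
  have hdiag2 : 2 * sumI (catsFull W ce co) (pvG W k)
      = sumI (catsFull W ce co) (fun c => pvFk W k c c)
        - sumI (catsFull W ce co) (fun c => if (c.1 * c.1) % W = k then c.2.2 else 0) := by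
    rw [← sumI_two_mul, sumI_congr hGc, sumI_sub]
  have hord := ordSum_eq (pvFk W k) (pvFk_symm W k) (catsFull W ce co)
  have hconv : sumI (catsFull W ce co) (fun x => sumI (catsFull W ce co) (fun y => pvFk W k x y))
      = sumI (List.range W) (fun a => sumI (List.range W) (fun b =>
          if (a * b) % W = k then (ce.getD a 0 - co.getD a 0) * (ce.getD b 0 - co.getD b 0) else 0)) := by
    rw [sumI_catsFull]
    apply sumI_congr
    intro a _
    rw [sumI_catsFull, sumI_catsFull, ← sumI_add]
    apply sumI_congr
    intro b _
    unfold pvFk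
    by_cases hkey : (a * b) % W = k <;> simp [hkey] <;> try ring
  have hdiagB : sumI (catsFull W ce co) (fun c => if (c.1 * c.1) % W = k then c.2.2 else 0)
      = sumI (List.range W) (fun r => if (r * r) % W = k then ce.getD r 0 + co.getD r 0 else 0) := by
    rw [sumI_catsFull]
    apply sumI_congr
    intro r _
    by_cases hkey : (r * r) % W = k <;> simp [hkey]
  have h2 : 2 * (sumI (catsFull W ce co) (pvG W k) + pairSum (pvFk W k) (catsFull W ce co))
      = (sumI (List.range W) (fun a => sumI (List.range W) (fun b =>
          if (a * b) % W = k then (ce.getD a 0 - co.getD a 0) * (ce.getD b 0 - co.getD b 0) else 0)))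
        - (sumI (List.range W) (fun r =>
            if (r * r) % W = k then ce.getD r 0 + co.getD r 0 else 0)) := by
    rw [← hconv, ← hdiagB]
    linarith [hord, hdiag2]
  rw [← h2, floordiv_two_mul_cancel]


theorem getElem_eq_getD (l : List Int) (i : Nat) (h : i < l.length) : l[i] = l.getD i 0 := by
  simp [List.getD_eq_getElem?_getD, List.getElem?_eq_getElem h]

theorem conv_entry (W k : Nat) (hk : k < W) (ce co : List Int) :
    ((((List.range W).filter (fun r =>
          ((List.range W).map (fun r => ce.getD r 0 - co.getD r 0)).getD r 0 != 0)).foldl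
        (fun conv a =>
        ((List.range W).filter (fun r =>
          ((List.range W).map (fun r => ce.getD r 0 - co.getD r 0)).getD r 0 != 0)).foldl
          (fun conv b =>
          pvAddAt conv ((a * b) % W)
            (((List.range W).map (fun r => ce.getD r 0 - co.getD r 0)).getD a 0 *
             ((List.range W).map (fun r => ce.getD r 0 - co.getD r 0)).getD b 0)) conv)
      (List.replicate W 0)).getD k 0)
    = sumI (List.range W) (fun a => sumI (List.range W) (fun b =>
        if (a * b) % W = k then (ce.getD a 0 - co.getD a 0) * (ce.getD b 0 - co.getD b 0) else 0)) := by
  rw [foldl2_entry W k hk]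
  have hzero : ∀ b ∈ List.range W,
      (((List.range W).map (fun r => ce.getD r 0 - co.getD r 0)).getD b 0 != 0) = false →
      ((List.range W).map (fun r => ce.getD r 0 - co.getD r 0)).getD b 0 = 0 := by
    intro b _ hb; simpa using hb
  have hinner : ∀ (a : Nat),
      sumI ((List.range W).filter (fun r =>
          ((List.range W).map (fun r => ce.getD r 0 - co.getD r 0)).getD r 0 != 0))
        (fun b => if (a * b) % W = k then
          ((List.range W).map (fun r => ce.getD r 0 - co.getD r 0)).getD a 0 *
          ((List.range W).map (fun r => ce.getD r 0 - co.getD r 0)).getD b 0 else 0)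
      = sumI (List.range W)
        (fun b => if (a * b) % W = k then
          ((List.range W).map (fun r => ce.getD r 0 - co.getD r 0)).getD a 0 *
          ((List.range W).map (fun r => ce.getD r 0 - co.getD r 0)).getD b 0 else 0) := by
    intro a
    apply sumI_filter_eq
    intro b hb hb0
    rw [hzero b hb hb0]
    split_ifs <;> ring
  rw [sumI_congr (fun a _ => hinner a)]
  rw [sumI_filter_eq _ _ _ (by
    intro a ha ha0
    have h0 := hzero a ha ha0
    have hz : sumI (List.range W)
        (fun b => if (a * b) % W = k then
          ((List.range W).map (fun r => ce.getD r 0 - co.getD r 0)).getD a 0 *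
          ((List.range W).map (fun r => ce.getD r 0 - co.getD r 0)).getD b 0 else 0)
        = sumI (List.range W) (fun _ => (0 : Int)) :=
      sumI_congr (fun b _ => by rw [h0]; split_ifs <;> ring)
    rw [hz, sumI_zero])]
  apply sumI_congr; intro a ha
  apply sumI_congr; intro b hb
  rw [getD_map_range _ _ _ (List.mem_range.mp ha), getD_map_range _ _ _ (List.mem_range.mp hb)]

theorem diag_entry (W k : Nat) (hk : k < W) (ce co : List Int) :
    (((List.range W).foldl (fun d r =>
        pvAddAt d ((r * r) % W)
          (((List.range W).map (fun r => ce.getD r 0 + co.getD r 0)).getD r 0))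
      (List.replicate W 0)).getD k 0)
    = sumI (List.range W) (fun r =>
        if (r * r) % W = k then ce.getD r 0 + co.getD r 0 else 0) := by
  rw [foldl1_entry W k hk]
  apply sumI_congr; intro r hr
  rw [getD_map_range _ _ _ (List.mem_range.mp hr)]

theorem ports_agree (Xlist : List (List Int)) (fn : Int) (lst : List Int) :
    construction_fast Xlist fn lst = construction_fast_alt Xlist fn lst := by
  unfold construction_fast construction_fast_alt
  dsimp only []
  obtain ⟨hce, hco⟩ := pvCounts_nonneg Xlist lst.length
  rw [cats_eq_filter]
  apply congrArg
  apply List.ext_getElem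
  · rw [accA_flatten, length_foldl_updStep]
    simp
  · intro k hk1 hk2
    have hkW : k < lst.length := by simpa using hk2
    rw [getElem_eq_getD _ _ hk1, accA_entry _ _ _ hkW,
      central lst.length k (pvCounts Xlist lst.length).1 (pvCounts Xlist lst.length).2 hkW hce hco]
    rw [List.getElem_map, List.getElem_range]
    rw [conv_entry _ _ hkW, diag_entry _ _ hkW]

-- ===== VERDICT (by name: the statement is the Claim_ definition above) =====
theorem construction_fast_spec : Claim_equal_construction_fast := by
  intro Xlist feature_num Lst_WaterMark _ _
  unfold Spec_construction_fast
  exact ports_agree Xlist feature_num Lst_WaterMark
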